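-- pv_equiv track=rewrite | github.com/montreal91/workshop | ap/codeforces/cf699/solution_d.py | solve_on_first3
-- ===== SOURCE A (Python) =====
-- def check_short_cycle(graph):
--     if graph[0][:3] == "*ba" and graph[1][:3] == "a*b":
--         return True
--     if graph[0][:3] == "*ab" and graph[1][:3] == "b*a":
--         return True
--     return False
--
-- def get_three_nodes(graph):
--     if graph[0][1] != graph[0][2]:
--         return 2, 0, 1
--     if graph[1][0] != graph[1][2]:
--         return 0, 1, 2
--     if graph[2][0] != graph[2][1]:
--         return 0, 2, 1
--
-- def solve_on_first3(graph, m):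
--     res = []
--     if check_short_cycle(graph):
--         for i in range(m+1):
--             res.append(str(i % 3 + 1))
--         return res
--
--     x, y, z = get_three_nodes(graph)
--     if (m // 2 % 2 == 1):
--         for i in range(m + 1):
--             if i % 4 == 0:
--                 res.append(str(x + 1))
--             elif i % 4 == 1:
--                 res.append(str(y + 1))
--             elif i % 4 == 2:
--                 res.append(str(z + 1))
--             elif i % 4 == 3:
--                 res.append(str(y + 1))
--     else:
--         for i in range(m + 1):
--             if i % 4 == 0:
--                 res.append(str(y + 1))
--             elif i % 4 == 1:
--                 res.append(str(z + 1))
--             elif i % 4 == 2: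
--                 res.append(str(y + 1))
--             elif i % 4 == 3:
--                 res.append(str(x + 1))
--     return res
-- ===== SOURCE B (Python) =====
-- def check_short_cycle(graph):
--     if graph[0][:3] == "*ba" and graph[1][:3] == "a*b":
--         return True
--     if graph[0][:3] == "*ab" and graph[1][:3] == "b*a":
--         return True
--     return False
--
--
-- def get_three_nodes(graph):
--     if graph[0][1] != graph[0][2]:
--         return 2, 0, 1
--     if graph[1][0] != graph[1][2]:
--         return 0, 1, 2
--     if graph[2][0] != graph[2][1]:
--         return 0, 2, 1
--
--
-- def solve_on_first3(graph, m):
--     if check_short_cycle(graph):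
--         period = ["1", "2", "3"]
--     else:
--         x, y, z = get_three_nodes(graph)
--         if m // 2 % 2 == 1:
--             period = [str(x + 1), str(y + 1), str(z + 1), str(y + 1)]
--         else:
--             period = [str(y + 1), str(z + 1), str(y + 1), str(x + 1)]
--     n = m + 1
--     if n <= 0:
--         return []
--     return (period * (n // len(period) + 1))[:n]
-- ===== Notes on version B (the rewrite author's own statement) =====
-- stated objective: simpler
-- what changed: B selects the 3- or 4-element repeating period once as a list and tiles it to length m+1 with list replication and a slice, replacing A's per-index loops over range(m+1) with i%3 / i%4 if-chains.
import Mathlib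
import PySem

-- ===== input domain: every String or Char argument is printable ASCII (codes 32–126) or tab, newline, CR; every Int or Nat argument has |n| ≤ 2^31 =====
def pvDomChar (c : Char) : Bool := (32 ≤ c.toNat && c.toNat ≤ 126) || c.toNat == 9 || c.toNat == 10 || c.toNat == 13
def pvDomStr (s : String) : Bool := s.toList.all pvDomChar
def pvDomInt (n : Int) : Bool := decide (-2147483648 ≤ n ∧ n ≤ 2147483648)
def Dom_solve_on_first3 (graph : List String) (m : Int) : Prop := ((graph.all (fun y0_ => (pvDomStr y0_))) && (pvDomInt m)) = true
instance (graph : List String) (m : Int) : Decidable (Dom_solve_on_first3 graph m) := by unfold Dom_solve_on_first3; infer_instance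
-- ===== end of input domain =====

-- B builds the repeating period as a list once and tiles it to length m+1 by replicate/take,
-- instead of A's per-index loop over range(m+1) with an i%3 / i%4 if-chain (objective: simpler).

-- ===== PORT A =====
-- helper: graph[i] as a List Char (exact where the index is in range, i.e. inside Pre_)
def pvRow (graph : List String) (i : Int) : List Char :=
  (PySem.List.pyGetD graph i "").toList

-- check_short_cycle (graph[0][:3] == "*ba" etc.; exact where the accesses are in range)
def check_short_cycle (graph : List String) : Bool :=
  if PySem.List.slice (pvRow graph 0) none (some 3) == ['*','b','a'] &&
     PySem.List.slice (pvRow graph 1) none (some 3) == ['a','*','b'] then true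
  else if PySem.List.slice (pvRow graph 0) none (some 3) == ['*','a','b'] &&
     PySem.List.slice (pvRow graph 1) none (some 3) == ['b','*','a'] then true
  else false

-- get_three_nodes (falls off the end → None; exact where the accesses are in range)
def get_three_nodes (graph : List String) : Option (Int × Int × Int) :=
  if PySem.List.pyGetD (pvRow graph 0) 1 ' ' != PySem.List.pyGetD (pvRow graph 0) 2 ' ' then
    some (2, 0, 1)
  else if PySem.List.pyGetD (pvRow graph 1) 0 ' ' != PySem.List.pyGetD (pvRow graph 1) 2 ' ' then
    some (0, 1, 2)
  else if PySem.List.pyGetD (pvRow graph 2) 0 ' ' != PySem.List.pyGetD (pvRow graph 2) 1 ' ' then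
    some (0, 2, 1)
  else none

def solve_on_first3 (graph : List String) (m : Int) : List String :=
  if check_short_cycle graph then
    (PySem.List.pyRange 0 (m + 1) 1).foldl
      (fun res i => res ++ [PySem.Int.toStr (PySem.Int.mod i 3 + 1)]) []
  else
    match get_three_nodes graph with
    | none => []   -- Python raises here (unpacking None); excluded by Pre_
    | some (x, y, z) =>
      if PySem.Int.mod (PySem.Int.floordiv m 2) 2 == 1 then
        (PySem.List.pyRange 0 (m + 1) 1).foldl (fun res i =>
          if PySem.Int.mod i 4 == 0 then res ++ [PySem.Int.toStr (x + 1)]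
          else if PySem.Int.mod i 4 == 1 then res ++ [PySem.Int.toStr (y + 1)]
          else if PySem.Int.mod i 4 == 2 then res ++ [PySem.Int.toStr (z + 1)]
          else if PySem.Int.mod i 4 == 3 then res ++ [PySem.Int.toStr (y + 1)]
          else res) []
      else
        (PySem.List.pyRange 0 (m + 1) 1).foldl (fun res i =>
          if PySem.Int.mod i 4 == 0 then res ++ [PySem.Int.toStr (y + 1)]
          else if PySem.Int.mod i 4 == 1 then res ++ [PySem.Int.toStr (z + 1)]
          else if PySem.Int.mod i 4 == 2 then res ++ [PySem.Int.toStr (y + 1)]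
          else if PySem.Int.mod i 4 == 3 then res ++ [PySem.Int.toStr (x + 1)]
          else res) []

-- ===== PORT B =====
-- (period * (n // len(period) + 1))[:n], guarded by n <= 0
def pvTile (period : List String) (m : Int) : List String :=
  let n := m + 1
  if n ≤ 0 then []
  else PySem.List.slice
    (PySem.List.pyRepeat period (PySem.Int.floordiv n (PySem.List.len period) + 1))
    none (some n)

def solve_on_first3_alt (graph : List String) (m : Int) : List String :=
  let period : List String :=
    if check_short_cycle graph then ["1", "2", "3"]
    else
      match get_three_nodes graph with
      | none => []   -- Python raises here; excluded by Pre_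
      | some (x, y, z) =>
        if PySem.Int.mod (PySem.Int.floordiv m 2) 2 == 1 then
          [PySem.Int.toStr (x + 1), PySem.Int.toStr (y + 1),
           PySem.Int.toStr (z + 1), PySem.Int.toStr (y + 1)]
        else
          [PySem.Int.toStr (y + 1), PySem.Int.toStr (z + 1),
           PySem.Int.toStr (y + 1), PySem.Int.toStr (x + 1)]
  pvTile period m

-- ===== PRECONDITION & SPEC =====
-- Pre_ = exactly the inputs on which the Python A returns: graph nonempty, graph[1] exists when
-- check_short_cycle must read it, and either a short cycle is detected or get_three_nodes can
-- evaluate its tests without an IndexError and one of them fires (else A raises unpacking None).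
def Pre_solve_on_first3 (graph : List String) (m : Int) : Prop :=
  graph ≠ [] ∧
  ((PySem.List.slice (pvRow graph 0) none (some 3) = ['*','b','a'] ∨
    PySem.List.slice (pvRow graph 0) none (some 3) = ['*','a','b']) → 2 ≤ graph.length) ∧
  (check_short_cycle graph = true ∨
    (3 ≤ (pvRow graph 0).length ∧
      ((PySem.List.pyGetD (pvRow graph 0) 1 ' ' != PySem.List.pyGetD (pvRow graph 0) 2 ' ') = true ∨
        (2 ≤ graph.length ∧ 3 ≤ (pvRow graph 1).length ∧
          ((PySem.List.pyGetD (pvRow graph 1) 0 ' ' != PySem.List.pyGetD (pvRow graph 1) 2 ' ') = true ∨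
            (3 ≤ graph.length ∧ 2 ≤ (pvRow graph 2).length ∧
              (PySem.List.pyGetD (pvRow graph 2) 0 ' ' != PySem.List.pyGetD (pvRow graph 2) 1 ' ') = true))))))

instance (graph : List String) (m : Int) : Decidable (Pre_solve_on_first3 graph m) := by
  unfold Pre_solve_on_first3; infer_instance

def pvWitness_solve_on_first3 : List String × Int := (["abc"], 5)

def Spec_solve_on_first3 (graph : List String) (m : Int) (out : List String) : Prop := out = solve_on_first3_alt graph m
instance (graph : List String) (m : Int) (out : List String) : Decidable (Spec_solve_on_first3 graph m out) := by unfold Spec_solve_on_first3; infer_instance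

-- ===== CLAIM (what is proved, stated in full; the proofs are below) =====
def Claim_equal_solve_on_first3 : Prop := ∀ (graph : List String) (m : Int), Dom_solve_on_first3 graph m → Pre_solve_on_first3 graph m → Spec_solve_on_first3 graph m (solve_on_first3 graph m)

-- ===== LEMMAS AND PROOFS =====

-- indexing into a tiled list: element i of period*r is period[i % len]
theorem pvFlatten_replicate_getElem (P : List String) (hP : 0 < P.length) :
    ∀ (r i : Nat) (h : i < ((List.replicate r P).flatten).length),
      ((List.replicate r P).flatten)[i] = P[i % P.length]'(Nat.mod_lt i hP) := by
  intro r
  induction r with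
  | zero => intro i h; simp at h
  | succ r ih =>
    intro i h
    simp only [List.replicate_succ, List.flatten_cons] at h ⊢
    by_cases h' : i < P.length
    · rw [List.getElem_append_left h']
      have e : i % P.length = i := Nat.mod_eq_of_lt h'
      simp only [e]
    · push_neg at h'
      rw [List.getElem_append_right h']
      rw [ih (i - P.length) (by simp at h ⊢; omega)]
      have e : (i - P.length) % P.length = i % P.length := by
        conv_rhs => rw [show i = i - P.length + P.length from by omega]
        rw [Nat.add_mod_right]
      simp only [e]

theorem pvTile_eq_map (P : List String) (hP : 0 < P.length) (m : Int) :
    pvTile P m = (List.range (m + 1).toNat).map (fun k => P.getD (k % P.length) "") := by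
  unfold pvTile
  by_cases hm : m + 1 ≤ 0
  · rw [if_pos hm]
    simp [Int.toNat_of_nonpos hm]
  · rw [if_neg hm]
    obtain ⟨n, hn⟩ : ∃ n : Nat, m + 1 = (n : Int) := ⟨(m + 1).toNat, by omega⟩
    rw [hn]
    have hlen : PySem.List.len P = (P.length : Int) := by simp [PySem.List.len]
    rw [hlen, PySem.Int.floordiv_natCast n P.length]
    have h1 : ((n / P.length : Nat) : Int) + 1 = ((n / P.length + 1 : Nat) : Int) := by push_cast; ring
    rw [h1]
    have hrep : PySem.List.pyRepeat P ((n / P.length + 1 : Nat) : Int)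
        = (List.replicate (n / P.length + 1) P).flatten := by
      rw [show PySem.List.pyRepeat P ((n / P.length + 1 : Nat) : Int)
          = (List.replicate (((n / P.length + 1 : Nat) : Int)).toNat P).flatten from rfl,
        Int.toNat_natCast]
    rw [hrep, PySem.List.slice_to_natCast, Int.toNat_natCast]
    have hle : n ≤ (n / P.length + 1) * P.length := by
      have h2 := Nat.div_add_mod n P.length
      have h3 := Nat.mod_lt n hP
      have h4 : (n / P.length + 1) * P.length = P.length * (n / P.length) + P.length := by ring
      omega
    have hflen : ((List.replicate (n / P.length + 1) P).flatten).length
        = (n / P.length + 1) * P.length := by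
      simp [List.length_flatten, Nat.mul_comm]
    apply List.ext_getElem
    · simp [hflen]; omega
    · intro i h1' h2'
      have hi : i < n := by simpa using h2'
      simp only [List.getElem_take, List.getElem_map, List.getElem_range]
      rw [pvFlatten_replicate_getElem P hP _ i (by rw [hflen]; omega)]
      rw [List.getD_eq_getElem P "" (Nat.mod_lt i hP)]

-- A's append loop over range(m+1) is the same map
theorem pvLoop_eq_tile (P : List String) (hP : 0 < P.length) (g : Int → String)
    (hg : ∀ k : Nat, g (k : Int) = P.getD (k % P.length) "") (m : Int) :
    (PySem.List.pyRange 0 (m + 1) 1).foldl (fun res i => res ++ [g i]) [] = pvTile P m := by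
  rw [PySem.List.foldl_append_singleton_eq_map, pvTile_eq_map P hP m,
    PySem.List.pyRange_one, List.map_map]
  simp only [Int.sub_zero, List.nil_append]
  exact List.map_congr_left (fun k _ => by simpa using hg k)

-- residue case split for i % 4 (positive divisor: 0 ≤ mod < d)
theorem pvMod4_cases (i : Int) :
    PySem.Int.mod i 4 = 0 ∨ PySem.Int.mod i 4 = 1 ∨ PySem.Int.mod i 4 = 2 ∨ PySem.Int.mod i 4 = 3 := by
  have h1 := PySem.Int.mod_nonneg i (b := 4) (by norm_num)
  have h2 := PySem.Int.mod_lt i (b := 4) (by norm_num)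
  omega

-- A's mod-4 if-chain as a singleton-append loop body
theorem pvChain4_eq (a b c d : String) :
    (fun (res : List String) (i : Int) =>
      if PySem.Int.mod i 4 == 0 then res ++ [a]
      else if PySem.Int.mod i 4 == 1 then res ++ [b]
      else if PySem.Int.mod i 4 == 2 then res ++ [c]
      else if PySem.Int.mod i 4 == 3 then res ++ [d]
      else res)
    = fun res i => res ++ [[a, b, c, d].getD (PySem.Int.mod i 4).toNat ""] := by
  funext res i
  rcases pvMod4_cases i with h | h | h | h <;> simp only [h] <;> rfl

theorem pvChain4_fold (a b c d : String) (m : Int) :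
    (PySem.List.pyRange 0 (m + 1) 1).foldl
      (fun res i =>
        if PySem.Int.mod i 4 == 0 then res ++ [a]
        else if PySem.Int.mod i 4 == 1 then res ++ [b]
        else if PySem.Int.mod i 4 == 2 then res ++ [c]
        else if PySem.Int.mod i 4 == 3 then res ++ [d]
        else res) []
    = pvTile [a, b, c, d] m := by
  rw [pvChain4_eq]
  apply pvLoop_eq_tile _ (by simp)
  intro k
  have hk : PySem.Int.mod (k : Int) 4 = ((k % 4 : Nat) : Int) := by
    exact_mod_cast PySem.Int.mod_natCast k 4
  rw [hk, Int.toNat_natCast]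
  rfl

-- the short-cycle loop body tiles ["1","2","3"]
theorem pvShort_fold (m : Int) :
    (PySem.List.pyRange 0 (m + 1) 1).foldl
      (fun res i => res ++ [PySem.Int.toStr (PySem.Int.mod i 3 + 1)]) []
    = pvTile ["1", "2", "3"] m := by
  apply pvLoop_eq_tile _ (by simp)
  intro k
  have hk : PySem.Int.mod (k : Int) 3 = ((k % 3 : Nat) : Int) := by
    exact_mod_cast PySem.Int.mod_natCast k 3
  rw [hk]
  have : k % 3 < 3 := Nat.mod_lt k (by norm_num)
  have hl : (["1", "2", "3"] : List String).length = 3 := rfl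
  rw [hl]
  interval_cases h : k % 3 <;> decide

-- under Pre_, a failed short-cycle test forces get_three_nodes to fire
theorem pvThree_some (graph : List String) (m : Int)
    (hpre : Pre_solve_on_first3 graph m) (hs : check_short_cycle graph = false) :
    get_three_nodes graph ≠ none := by
  obtain ⟨-, -, h3⟩ := hpre
  rcases h3 with h | ⟨-, h⟩
  · rw [hs] at h; simp at h
  · unfold get_three_nodes
    by_cases c1 : (PySem.List.pyGetD (pvRow graph 0) 1 ' ' != PySem.List.pyGetD (pvRow graph 0) 2 ' ') = true
    · simp [c1]
    · have e1 : PySem.List.pyGetD (pvRow graph 0) 1 ' ' = PySem.List.pyGetD (pvRow graph 0) 2 ' ' := by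
        simpa using c1
      by_cases c2 : (PySem.List.pyGetD (pvRow graph 1) 0 ' ' != PySem.List.pyGetD (pvRow graph 1) 2 ' ') = true
      · simp [e1, c2]
      · have e2 : PySem.List.pyGetD (pvRow graph 1) 0 ' ' = PySem.List.pyGetD (pvRow graph 1) 2 ' ' := by
          simpa using c2
        rcases h with h | ⟨-, -, h | ⟨-, -, c3⟩⟩
        · exact absurd h c1
        · exact absurd h c2
        · simp [e1, e2, c3]

-- ===== VERDICT (by name: the statement is the Claim_ definition above) =====
theorem solve_on_first3_spec : Claim_equal_solve_on_first3 := by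
  intro graph m _ hpre
  unfold Spec_solve_on_first3 solve_on_first3 solve_on_first3_alt
  by_cases hs : check_short_cycle graph = true
  · simp only [hs, if_true]
    exact pvShort_fold m
  · rw [Bool.not_eq_true] at hs
    simp only [hs, Bool.false_eq_true, if_false]
    cases hG : get_three_nodes graph with
    | none => exact absurd hG (pvThree_some graph m hpre hs)
    | some t =>
      obtain ⟨x, y, z⟩ := t
      by_cases hm : (PySem.Int.mod (PySem.Int.floordiv m 2) 2 == 1) = true
      · simp only [hm, if_true]
        exact pvChain4_fold _ _ _ _ m
      · rw [Bool.not_eq_true] at hm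
        simp only [hm, Bool.false_eq_true, if_false]
        exact pvChain4_fold _ _ _ _ m
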